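-- pv_equiv track=rewrite | github.com/SteveGJones/ai-first-sdlc-practices | tools/automation/agent-installer.py | _parse_basic_metadata
-- ===== SOURCE A (Python) =====
-- from typing import Dict, List, Optional
--
-- def _parse_basic_metadata(yaml_content: str) -> Dict:
--     """Fallback parser for basic agent metadata when YAML parsing fails."""
--     metadata = {}
--
--     # Split into lines and parse basic fields
--     lines = yaml_content.strip().split("\n")
--
--     for line in lines:
--         # Skip empty lines and comments
--         line = line.strip()
--         if not line or line.startswith("#"):
--             continue
--
--         # Parse key: value pairs (only first colon)
--         if ":" in line:
--             key, value = line.split(":", 1)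
--             key = key.strip()
--             value = value.strip()
--
--             # Only extract essential fields
--             if key == "name":
--                 metadata["name"] = value
--             elif key == "description":
--                 # Take only the first sentence for descriptions
--                 metadata["description"] = value.split(
--                     ".")[0] + "." if value else ""
--             elif key == "version":
--                 metadata["version"] = value
--             elif key == "category":
--                 metadata["category"] = value
--             elif key == "priority":
--                 metadata["priority"] = value
--
--     # Ensure we have at least a name
--     if "name" not in metadata and lines:
--         # Use filename as fallback name
--         metadata["name"] = "unknown-agent"
--
--     return metadata if metadata else None
-- ===== SOURCE B (Python) =====
-- def _parse_basic_metadata(yaml_content: str):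
--     """Fallback parser: collect all key/value lines into one dict, then select the essential fields."""
--     lines = yaml_content.strip().split("\n")
--
--     # Pass 1: every 'key: value' line (last occurrence wins), skipping blanks and comments.
--     fields = {}
--     for raw in lines:
--         line = raw.strip()
--         if not line or line.startswith("#"):
--             continue
--         if ":" in line:
--             key, value = line.split(":", 1)
--             fields[key.strip()] = value.strip()
--
--     # Pass 2: keep only the essential fields, trimming descriptions to their first sentence.
--     metadata = {}
--     for key, value in fields.items():
--         if key == "description":
--             metadata["description"] = value.split(".")[0] + "." if value else ""
--         elif key in ("name", "version", "category", "priority"):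
--             metadata[key] = value
--
--     # lines is never empty, so the fallback name always applies.
--     if "name" not in metadata:
--         metadata["name"] = "unknown-agent"
--     return metadata
-- ===== Notes on version B (the rewrite author's own statement) =====
-- stated objective: simpler
-- what changed: A filters for the five essential keys with a five-way dispatch inside its single line loop; B first collects every key:value line into one dict (last wins) and then selects and transforms the essential fields from that dict in a second pass, with an unconditional name fallback since the line list is never empty.
import Mathlib
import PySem

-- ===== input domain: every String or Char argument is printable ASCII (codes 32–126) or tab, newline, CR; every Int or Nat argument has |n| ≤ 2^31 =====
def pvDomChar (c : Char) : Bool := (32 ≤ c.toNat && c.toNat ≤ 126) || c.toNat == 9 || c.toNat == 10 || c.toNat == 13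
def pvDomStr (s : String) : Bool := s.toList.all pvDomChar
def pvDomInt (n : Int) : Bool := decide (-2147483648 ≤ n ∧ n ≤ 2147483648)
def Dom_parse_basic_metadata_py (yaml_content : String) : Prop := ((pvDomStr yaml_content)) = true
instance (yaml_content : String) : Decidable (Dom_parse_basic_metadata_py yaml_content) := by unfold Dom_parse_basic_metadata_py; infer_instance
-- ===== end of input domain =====

-- B replaces A's five-way dispatch inside the single line loop by two short passes — collect every
-- `key: value` line into one dict, then select the essential fields from it — same return value
-- (objective: simpler decomposition; no speed claim).

-- ===== PORT A =====
-- A's loop body: skip blanks/comments, split on the first colon, five-way dispatch on the key.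
def pvStepA (md : PySem.Dict String String) (line0 : String) : PySem.Dict String String :=
  let line := PySem.Str.strip line0
  if line = "" || PySem.Str.startswith line "#" then md
  else if PySem.Str.isIn ":" line then
    match PySem.Str.splitMax? line ":" 1 with
    | some (k0 :: v0 :: _) =>
      let key := PySem.Str.strip k0
      let value := PySem.Str.strip v0
      if key = "name" then md.insert "name" value
      else if key = "description" then
        md.insert "description"
          (if value ≠ "" then ((PySem.Str.split? value ".").getD []).headD "" ++ "." else "")
      else if key = "version" then md.insert "version" value
      else if key = "category" then md.insert "category" value
      else if key = "priority" then md.insert "priority" value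
      else md
    | _ => md  -- unreachable: ":" ∈ line guarantees at least two pieces
  else md

def parse_basic_metadata_py (yaml_content : String) : Option (List (String × String)) :=
  let lines := (PySem.Str.split? (PySem.Str.strip yaml_content) "\n").getD []
  let metadata := lines.foldl pvStepA PySem.Dict.empty
  let metadata :=
    if !(metadata.contains "name") && !lines.isEmpty then metadata.insert "name" "unknown-agent"
    else metadata
  if metadata.items.isEmpty then none else some metadata.items

-- ===== PORT B =====
-- description = value.split(".")[0] + "." if value else ""
def pvFirstSentence (value : String) : String :=
  if value ≠ "" then ((PySem.Str.split? value ".").getD []).headD "" ++ "." else ""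

-- B pass 1 body: store every `key: value` line into `fields` (skipping blanks/comments).
def pvStepFields (d : PySem.Dict String String) (raw : String) : PySem.Dict String String :=
  let line := PySem.Str.strip raw
  if line = "" || PySem.Str.startswith line "#" then d
  else if PySem.Str.isIn ":" line then
    match PySem.Str.splitMax? line ":" 1 with
    | some (k0 :: v0 :: _) => d.insert (PySem.Str.strip k0) (PySem.Str.strip v0)
    | _ => d  -- unreachable: ":" ∈ line guarantees at least two pieces
  else d

-- B pass 2 body: select the essential fields from the collected items.
def pvStepSelect (md : PySem.Dict String String) (kv : String × String) : PySem.Dict String String :=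
  if kv.1 = "description" then md.insert "description" (pvFirstSentence kv.2)
  else if kv.1 = "name" ∨ kv.1 = "version" ∨ kv.1 = "category" ∨ kv.1 = "priority" then
    md.insert kv.1 kv.2
  else md

def parse_basic_metadata_py_alt (yaml_content : String) : Option (List (String × String)) :=
  let lines := (PySem.Str.split? (PySem.Str.strip yaml_content) "\n").getD []
  let fields := lines.foldl pvStepFields PySem.Dict.empty
  let metadata := fields.items.foldl pvStepSelect PySem.Dict.empty
  let metadata :=
    if !(metadata.contains "name") then metadata.insert "name" "unknown-agent" else metadata
  some metadata.items

-- ===== PRECONDITION & SPEC =====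
def Spec_parse_basic_metadata_py (yaml_content : String) (out : Option (List (String × String))) : Prop := out = parse_basic_metadata_py_alt yaml_content
instance (yaml_content : String) (out : Option (List (String × String))) : Decidable (Spec_parse_basic_metadata_py yaml_content out) := by unfold Spec_parse_basic_metadata_py; infer_instance

-- ===== CLAIM (what is proved, stated in full; the proofs are below) =====
def Claim_equal_parse_basic_metadata_py : Prop := ∀ (yaml_content : String), Dom_parse_basic_metadata_py yaml_content → Spec_parse_basic_metadata_py yaml_content (parse_basic_metadata_py yaml_content)

-- ===== LEMMAS AND PROOFS =====

-- Python's str.split with a non-empty separator always returns at least one piece.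
theorem pvGoNe (sep : List Char) : ∀ (fuel : Nat) (l cur : List Char) (acc : List (List Char)),
    PySem.Chars.splitOn.go sep fuel l cur acc ≠ [] := by
  intro fuel
  induction fuel with
  | zero => intro l cur acc; rw [PySem.Chars.splitOn.go.eq_def]; simp
  | succ n ih =>
    intro l cur acc
    rw [PySem.Chars.splitOn.go.eq_def]
    split
    · simp
    · simp
    · rename_i a b c d fuel ch rest heq1
      have hf : fuel = n := by omega
      subst hf
      split <;> exact ih _ _ _

theorem pvSplit_ne_nil (s : String) : ((PySem.Str.split? s "\n").getD []) ≠ [] := by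
  simp [PySem.Str.split?, PySem.Chars.split?, PySem.Chars.splitOn]
  intro h
  exact pvGoNe _ _ _ _ _ h

-- the selection A performs, per (key, value) pair
def pvSel (p : String × String) : Option (String × String) :=
  if p.1 = "description" then some ("description", pvFirstSentence p.2)
  else if p.1 = "name" ∨ p.1 = "version" ∨ p.1 = "category" ∨ p.1 = "priority" then some p
  else none

def pvSelD (d : PySem.Dict String String) : PySem.Dict String String :=
  PySem.Dict.mk (d.items.filterMap pvSel)

theorem pvSel_key {p q : String × String} (h : pvSel p = some q) : q.1 = p.1 := by
  unfold pvSel at h; split_ifs at h with h1 h2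
  · cases h; simp [h1]
  · cases h; rfl

theorem pvSel_key_only (p : String × String) (v : String) :
    (pvSel (p.1, v)).isSome = (pvSel p).isSome := by
  unfold pvSel; split_ifs <;> rfl

theorem pvAny_filterMap (l : List (String × String)) (k : String)
    (hk : (pvSel (k, "x")).isSome) :
    ((l.filterMap pvSel).any fun p => p.1 == k) = (l.any fun p => p.1 == k) := by
  induction l with
  | nil => rfl
  | cons p l ih =>
    cases hs : pvSel p with
    | none =>
      have hne : ¬ (p.1 == k) := by
        intro hbe
        have h1 : p.1 = k := by simpa using hbe
        rw [← pvSel_key_only (k, "x") p.2] at hk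
        simp [← h1, hs] at hk
      simp [hs, hne, ih]
    | some q => simp [hs, List.any_cons, pvSel_key hs, ih]

theorem pvFilterMap_map_repl (l : List (String × String)) (k v w : String)
    (hw : pvSel (k, v) = some (k, w)) :
    ((l.map fun p => if p.1 == k then (k, v) else p).filterMap pvSel)
      = (l.filterMap pvSel).map fun q => if q.1 == k then (k, w) else q := by
  induction l with
  | nil => rfl
  | cons p l ih =>
    rw [List.map_cons, List.filterMap_cons, List.filterMap_cons]
    by_cases hpk : p.1 = k
    · have hsome : (pvSel p).isSome := by
        rw [← pvSel_key_only p v, hpk, hw]; rfl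
      obtain ⟨q, hq⟩ := Option.isSome_iff_exists.mp hsome
      have hqk : q.1 = k := (pvSel_key hq).trans hpk
      have e1 : (if (p.1 == k) = true then (k, v) else p) = (k, v) := by simp [hpk]
      have e2 : (if (q.1 == k) = true then (k, w) else q) = (k, w) := by simp [hqk]
      rw [e1, hw, hq, List.map_cons, e2, ih]
    · have e1 : (if (p.1 == k) = true then (k, v) else p) = p := by simp [hpk]
      rw [e1]
      cases hs : pvSel p with
      | none => rw [ih]
      | some q =>
        have e2 : (if (q.1 == k) = true then (k, w) else q) = q := by
          simp [pvSel_key hs, hpk]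
        rw [List.map_cons, e2, ih]

theorem pvFilterMap_map_repl_none (l : List (String × String)) (k v : String)
    (h : pvSel (k, v) = none) :
    ((l.map fun p => if p.1 == k then (k, v) else p).filterMap pvSel) = l.filterMap pvSel := by
  induction l with
  | nil => rfl
  | cons p l ih =>
    rw [List.map_cons, List.filterMap_cons, List.filterMap_cons]
    by_cases hpk : p.1 = k
    · have hnone : pvSel p = none := by
        have h2 := pvSel_key_only p v
        rw [hpk, h] at h2
        exact Option.not_isSome_iff_eq_none.mp (by simp [← h2])
      have e1 : (if (p.1 == k) = true then (k, v) else p) = (k, v) := by simp [hpk]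
      rw [e1, h, hnone, ih]
    · have e1 : (if (p.1 == k) = true then (k, v) else p) = p := by simp [hpk]
      rw [e1]
      cases hs : pvSel p with
      | none => exact ih
      | some q => rw [ih]

theorem pvSelD_insert_essential (d : PySem.Dict String String) (k v w : String)
    (hw : pvSel (k, v) = some (k, w)) :
    pvSelD (d.insert k v) = (pvSelD d).insert k w := by
  have hk : (pvSel (k, "x")).isSome := by
    rw [pvSel_key_only (k, v) "x", hw]; rfl
  have hcont : (pvSelD d).contains k = d.contains k := by
    unfold pvSelD PySem.Dict.contains
    exact pvAny_filterMap _ _ hk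
  unfold PySem.Dict.insert
  by_cases hc : d.contains k = true
  · rw [if_pos hc, if_pos (hcont.trans hc)]
    unfold pvSelD
    exact congrArg PySem.Dict.mk (pvFilterMap_map_repl _ _ _ _ hw)
  · rw [if_neg hc, if_neg (fun h => hc (hcont.symm.trans h))]
    unfold pvSelD
    refine congrArg PySem.Dict.mk ?_
    rw [List.filterMap_append]
    simp [hw]

theorem pvSelD_insert_none (d : PySem.Dict String String) (k v : String)
    (h : pvSel (k, v) = none) :
    pvSelD (d.insert k v) = pvSelD d := by
  unfold PySem.Dict.insert
  by_cases hc : d.contains k = true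
  · rw [if_pos hc]
    exact congrArg PySem.Dict.mk (pvFilterMap_map_repl_none _ _ _ h)
  · rw [if_neg hc]
    unfold pvSelD
    refine congrArg PySem.Dict.mk ?_
    rw [List.filterMap_append]
    simp [h]

theorem pvInsert_commute (d : PySem.Dict String String) (key value : String) :
    pvSelD (d.insert key value) = pvStepSelect (pvSelD d) (key, value) := by
  unfold pvStepSelect
  by_cases h1 : key = "description"
  · rw [if_pos h1]
    refine (h1 ▸ pvSelD_insert_essential d key value (pvFirstSentence value) ?_)
    simp [pvSel, h1]
  · rw [if_neg h1]
    by_cases h2 : key = "name" ∨ key = "version" ∨ key = "category" ∨ key = "priority"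
    · rw [if_pos h2]
      exact pvSelD_insert_essential d key value value (by simp [pvSel, h1, h2])
    · rw [if_neg h2]
      refine pvSelD_insert_none d key value ?_
      simp only [pvSel, if_neg h1]
      rw [if_neg]
      push Not at h2
      simp [h2]

theorem pvStep_commute (d : PySem.Dict String String) (raw : String) :
    pvSelD (pvStepFields d raw) = pvStepA (pvSelD d) raw := by
  unfold pvStepFields pvStepA
  dsimp only
  split_ifs with h1 h2
  · rfl
  · cases hm : PySem.Str.splitMax? (PySem.Str.strip raw) ":" 1 with
    | none => rfl
    | some parts =>
      cases parts with
      | nil => rfl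
      | cons k0 t =>
        cases t with
        | nil => rfl
        | cons v0 rest =>
          rw [pvInsert_commute d (PySem.Str.strip k0) (PySem.Str.strip v0)]
          unfold pvStepSelect pvFirstSentence
          dsimp only
          by_cases ha : PySem.Str.strip k0 = "description"
          · simp [ha]
          · by_cases hb : PySem.Str.strip k0 = "name"
            · simp [hb]
            · by_cases hc : PySem.Str.strip k0 = "version"
              · simp [hc]
              · by_cases hd : PySem.Str.strip k0 = "category"
                · simp [hd]
                · by_cases he : PySem.Str.strip k0 = "priority"
                  · simp [he]
                  · simp [ha, hb, hc, hd, he]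
  · rfl

theorem pvFold_commute (ls : List String) (d : PySem.Dict String String) :
    pvSelD (ls.foldl pvStepFields d) = ls.foldl pvStepA (pvSelD d) := by
  induction ls generalizing d with
  | nil => rfl
  | cons x xs ih => simp only [List.foldl_cons, ih, pvStep_commute]

theorem pvFields_nodup (ls : List String) (d : PySem.Dict String String)
    (h : d.keys.Nodup) : (ls.foldl pvStepFields d).keys.Nodup := by
  induction ls generalizing d with
  | nil => exact h
  | cons x xs ih =>
    rw [List.foldl_cons]
    apply ih
    unfold pvStepFields
    dsimp only
    split_ifs
    · exact h
    · split
      · exact PySem.Dict.nodup_keys_insert _ _ _ h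
      · exact h
    · exact h

theorem pvSelect_pass (l : List (String × String)) (md : PySem.Dict String String)
    (hfresh : ∀ p ∈ l, md.contains p.1 = false) (hnd : (l.map Prod.fst).Nodup) :
    l.foldl pvStepSelect md = PySem.Dict.mk (md.items ++ l.filterMap pvSel) := by
  induction l generalizing md with
  | nil => simp
  | cons p l ih =>
    rw [List.map_cons, List.nodup_cons] at hnd
    have hf : md.contains p.1 = false := hfresh p (List.mem_cons_self ..)
    have hitems : (pvStepSelect md p).items = md.items ++ (pvSel p).toList := by
      unfold pvStepSelect pvSel
      split_ifs with h1 h2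
      · rw [PySem.Dict.items_insert_of_not_contains _ _ (h1 ▸ hf)]
        simp
      · rw [PySem.Dict.items_insert_of_not_contains _ _ hf]
        simp
      · simp
    have hcont : ∀ q ∈ l, (pvStepSelect md p).contains q.1 = false := by
      intro q hq
      have hq1 : ¬ (q.1 = p.1) := fun e => hnd.1 (e ▸ List.mem_map_of_mem hq)
      unfold pvStepSelect
      split_ifs with h1 h2
      · rw [PySem.Dict.contains_insert]
        simp [h1 ▸ hq1, hfresh q (List.mem_cons_of_mem _ hq)]
      · rw [PySem.Dict.contains_insert]
        simp [hq1, hfresh q (List.mem_cons_of_mem _ hq)]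
      · exact hfresh q (List.mem_cons_of_mem _ hq)
    rw [List.foldl_cons, ih _ hcont hnd.2, hitems, List.filterMap_cons]
    cases pvSel p <;> simp

theorem pvContains_items_ne_nil (d : PySem.Dict String String)
    (h : d.contains "name" = true) : d.items.isEmpty = false := by
  cases hd : d.items with
  | nil => unfold PySem.Dict.contains at h; rw [hd] at h; simp at h
  | cons a l => simp

-- ===== VERDICT (by name: the statement is the Claim_ definition above) =====
theorem parse_basic_metadata_py_spec : Claim_equal_parse_basic_metadata_py := by
  intro yaml_content _
  unfold Spec_parse_basic_metadata_py parse_basic_metadata_py parse_basic_metadata_py_alt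
  dsimp only
  set L := (PySem.Str.split? (PySem.Str.strip yaml_content) "\n").getD [] with hLdef
  set F := L.foldl pvStepFields PySem.Dict.empty with hFdef
  clear_value L F
  have hLe : L.isEmpty = false := by
    rw [List.isEmpty_eq_false_iff, hLdef]
    exact pvSplit_ne_nil _
  have hA : L.foldl pvStepA PySem.Dict.empty = pvSelD F := by
    rw [hFdef, pvFold_commute]
    rfl
  have hB : F.items.foldl pvStepSelect PySem.Dict.empty = pvSelD F := by
    rw [pvSelect_pass _ _ (fun p _ => PySem.Dict.contains_empty p.1)
      (by rw [hFdef]; exact pvFields_nodup L PySem.Dict.empty PySem.Dict.nodup_keys_empty)]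
    rfl
  rw [hA, hB, hLe]
  cases hnm : (pvSelD F).contains "name" with
  | false =>
    simp only [hnm, Bool.not_false, Bool.and_true, if_true]
    rw [pvContains_items_ne_nil _ (PySem.Dict.contains_insert_self _ _ _)]
    rfl
  | true =>
    simp only [Bool.not_true, Bool.false_and, if_neg (by simp : ¬ (false = true))]
    rw [pvContains_items_ne_nil _ hnm]
    rfl
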